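-- pv_equiv track=rewrite | github.com/azhagusiva11/Dec_EMR | core/clinical/symptom_analyzer.py | _remove_redundant_symptoms
-- ===== SOURCE A (Python) =====
-- from typing import List, Set, Dict
--
-- def _remove_redundant_symptoms(symptoms: List[str]) -> List[str]:
--     """Remove redundant symptoms (e.g., 'pain' when 'chest pain' exists)"""
--     filtered = []
--
--     for symptom in symptoms:
--         is_redundant = False
--
--         # Check if this symptom is part of another symptom
--         for other in symptoms:
--             if symptom != other and symptom in other:
--                 is_redundant = True
--                 break
--
--         if not is_redundant:
--             filtered.append(symptom)
--
--     return filtered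
-- ===== SOURCE B (Python) =====
-- def _remove_redundant_symptoms(symptoms):
--     """Keep only symptoms that are not proper substrings of another symptom.
--
--     A string can only be a proper substring of a strictly longer string, so we
--     test each symptom against the distinct symptoms sorted by decreasing
--     length, stopping as soon as the candidates are no longer than it.
--     """
--     uniq = sorted(dict.fromkeys(symptoms), key=len, reverse=True)
--     out = []
--     for s in symptoms:
--         keep = True
--         for o in uniq:
--             if len(o) <= len(s):
--                 break
--             if s in o:
--                 keep = False
--                 break
--         if keep:
--             out.append(s)
--     return out
-- ===== Notes on version B (the rewrite author's own statement) =====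
-- stated objective: alternative
-- what changed: B precomputes the distinct symptoms sorted by decreasing length and tests each symptom only against strictly longer candidates, breaking off at the first candidate no longer than it, instead of A's flag-and-break scan of the whole list for every symptom.
import Mathlib
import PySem

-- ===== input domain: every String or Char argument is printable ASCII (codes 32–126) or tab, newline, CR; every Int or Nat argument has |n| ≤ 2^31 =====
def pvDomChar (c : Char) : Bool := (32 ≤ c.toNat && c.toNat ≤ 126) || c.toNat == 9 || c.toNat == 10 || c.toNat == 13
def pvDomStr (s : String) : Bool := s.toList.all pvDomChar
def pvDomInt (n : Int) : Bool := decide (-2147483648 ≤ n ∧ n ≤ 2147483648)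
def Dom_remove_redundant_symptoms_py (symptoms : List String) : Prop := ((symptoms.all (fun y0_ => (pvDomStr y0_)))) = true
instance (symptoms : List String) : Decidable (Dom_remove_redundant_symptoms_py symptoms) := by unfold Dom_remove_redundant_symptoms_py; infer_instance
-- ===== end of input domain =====

-- B deduplicates the symptoms once and tests each symptom only against the strictly longer
-- candidates (distinct symptoms sorted by decreasing length, stopping at the first candidate
-- no longer than it), instead of A's full inner scan of the whole list for every symptom.

-- ===== PORT A =====
-- inner loop 'for other in symptoms: if symptom != other and symptom in other: is_redundant = True; break'
def pvAInner (symptom : String) (others : List String) : Bool :=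
  match others with
  | [] => false
  | other :: rest =>
    if symptom ≠ other ∧ PySem.Str.isIn symptom other then true
    else pvAInner symptom rest

def remove_redundant_symptoms_py (symptoms : List String) : List String :=
  symptoms.foldl
    (fun filtered symptom =>
      if pvAInner symptom symptoms then filtered else filtered ++ [symptom])
    []

-- ===== PORT B =====
-- inner loop over the length-sorted distinct symptoms, breaking at the first o with len(o) <= len(s)
def pvBScan (s : String) (uniq : List String) : Bool :=
  match uniq with
  | [] => true
  | o :: rest =>
    if PySem.Str.len o ≤ PySem.Str.len s then true
    else if PySem.Str.isIn s o then false
    else pvBScan s rest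

def remove_redundant_symptoms_py_alt (symptoms : List String) : List String :=
  let uniq := PySem.List.sorted (PySem.List.dedup symptoms) PySem.Str.len true
  symptoms.foldl
    (fun out s => if pvBScan s uniq then out ++ [s] else out)
    []

-- ===== PRECONDITION & SPEC =====
def Spec_remove_redundant_symptoms_py (symptoms : List String) (out : List String) : Prop := out = remove_redundant_symptoms_py_alt symptoms
instance (symptoms : List String) (out : List String) : Decidable (Spec_remove_redundant_symptoms_py symptoms out) := by unfold Spec_remove_redundant_symptoms_py; infer_instance

-- ===== CLAIM (what is proved, stated in full; the proofs are below) =====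
def Claim_equal_remove_redundant_symptoms_py : Prop := ∀ (symptoms : List String), Dom_remove_redundant_symptoms_py symptoms → Spec_remove_redundant_symptoms_py symptoms (remove_redundant_symptoms_py symptoms)

-- ===== LEMMAS AND PROOFS =====

-- A's inner break-loop is an existence test over the whole list.
theorem pvAInner_eq_any (s : String) (xs : List String) :
    pvAInner s xs = xs.any (fun o => decide (s ≠ o) && PySem.Str.isIn s o) := by
  induction xs with
  | nil => rfl
  | cons o rest ih =>
    simp only [pvAInner, List.any_cons, ih]
    by_cases h : s ≠ o ∧ PySem.Str.isIn s o = true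
    · rw [if_pos h, show (decide (s ≠ o) && PySem.Str.isIn s o) = true by
          rw [decide_eq_true h.1, Bool.true_and]; exact h.2, Bool.true_or]
    · rw [if_neg h]
      have hpA : (decide (s ≠ o) && PySem.Str.isIn s o) = false := by
        rw [not_and_or] at h
        rcases h with h | h
        · rw [decide_eq_false h, Bool.false_and]
        · rw [Bool.eq_false_iff.mpr h, Bool.and_false]
      rw [hpA, Bool.false_or]

-- the two inner-loop predicates agree on strings: a proper containment forces a longer container
theorem pvPred_iff (s o : String) :
    (s ≠ o ∧ PySem.Str.isIn s o = true) ↔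
      (PySem.Str.len s < PySem.Str.len o ∧ PySem.Str.isIn s o = true) := by
  constructor
  · rintro ⟨hne, hin⟩
    refine ⟨?_, hin⟩
    have hinf : s.toList <:+: o.toList := (PySem.Str.isIn_iff_infix s o).mp hin
    have hle : s.toList.length ≤ o.toList.length := hinf.sublist.length_le
    rcases lt_or_eq_of_le hle with hlt | heq
    · simp only [PySem.Str.len_eq]; exact_mod_cast hlt
    · exact absurd (String.toList_inj.mp (hinf.sublist.eq_of_length heq)) hne
  · rintro ⟨hlt, hin⟩
    refine ⟨?_, hin⟩
    intro h; subst h; simp at hlt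

-- the two inner predicates are the same Boolean function on strings
theorem pvPoint (s o : String) :
    (decide (s ≠ o) && PySem.Str.isIn s o)
      = (decide (PySem.Str.len s < PySem.Str.len o) && PySem.Str.isIn s o) := by
  cases hin : PySem.Str.isIn s o
  · simp
  · simp only [Bool.and_true]
    refine decide_eq_decide.mpr ?_
    have h := pvPred_iff s o
    simp only [hin, and_true] at h
    exact h

-- B's break-loop on a list pairwise decreasing in length is an existence test over all of it
theorem pvBScan_eq_not_any (s : String) (uniq : List String)
    (hp : uniq.Pairwise (fun a b => PySem.Str.len b ≤ PySem.Str.len a)) :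
    pvBScan s uniq
      = !uniq.any (fun o => decide (PySem.Str.len s < PySem.Str.len o) && PySem.Str.isIn s o) := by
  induction uniq with
  | nil => rfl
  | cons o rest ih =>
    rcases List.pairwise_cons.mp hp with ⟨hhead, htail⟩
    simp only [pvBScan, List.any_cons, Bool.not_or]
    by_cases hlen : PySem.Str.len o ≤ PySem.Str.len s
    · have hd : decide (PySem.Str.len s < PySem.Str.len o) = false := by
        simp only [decide_eq_false_iff_not]; omega
      have h2 : rest.any (fun o => decide (PySem.Str.len s < PySem.Str.len o) && PySem.Str.isIn s o) = false := by
        rw [List.any_eq_false]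
        intro x hx
        have hx' := hhead x hx
        simp only [Bool.and_eq_true, decide_eq_true_eq, not_and]
        intro hcon
        omega
      rw [if_pos hlen, hd, h2]
      rfl
    · have hd : decide (PySem.Str.len s < PySem.Str.len o) = true := by
        simp only [decide_eq_true_eq]; omega
      rw [if_neg hlen]
      cases hin : PySem.Str.isIn s o
      · rw [if_neg (by simp), ih htail]
        simp
      · rw [if_pos rfl, hd]
        simp

-- the two keep-decisions coincide for every symptom
theorem pvKeep_eq (symptoms : List String) (s : String) :
    pvBScan s (PySem.List.sorted (PySem.List.dedup symptoms) PySem.Str.len true)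
      = !pvAInner s symptoms := by
  set uniq := PySem.List.sorted (PySem.List.dedup symptoms) PySem.Str.len true with huniq
  rw [pvBScan_eq_not_any s uniq (huniq ▸ PySem.List.sorted_pairwise_rev _ _),
      pvAInner_eq_any]
  have hmem : ∀ x, x ∈ uniq ↔ x ∈ symptoms := by
    intro x
    rw [huniq, PySem.List.mem_sorted, PySem.List.mem_dedup]
  have hany : uniq.any (fun o => decide (PySem.Str.len s < PySem.Str.len o) && PySem.Str.isIn s o)
      = symptoms.any (fun o => decide (s ≠ o) && PySem.Str.isIn s o) := by
    refine Bool.eq_iff_iff.mpr ?_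
    simp only [List.any_eq_true]
    constructor
    · rintro ⟨o, ho, hpo⟩
      exact ⟨o, (hmem o).mp ho, by rw [pvPoint]; exact hpo⟩
    · rintro ⟨o, ho, hpo⟩
      exact ⟨o, (hmem o).mpr ho, by rw [← pvPoint]; exact hpo⟩
  rw [hany]

-- ===== VERDICT (by name: the statement is the Claim_ definition above) =====
theorem remove_redundant_symptoms_py_spec : Claim_equal_remove_redundant_symptoms_py := by
  intro symptoms _
  unfold Spec_remove_redundant_symptoms_py remove_redundant_symptoms_py remove_redundant_symptoms_py_alt
  have hfun : (fun (filtered : List String) symptom =>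
        if pvAInner symptom symptoms then filtered else filtered ++ [symptom])
      = (fun out s =>
        if pvBScan s (PySem.List.sorted (PySem.List.dedup symptoms) PySem.Str.len true)
        then out ++ [s] else out) := by
    funext acc s
    rw [pvKeep_eq symptoms s]
    cases pvAInner s symptoms <;> simp
  rw [hfun]
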